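-- pv_equiv track=rewrite | github.com/atuchiya/A2G | scripts/netlsit.py | find_symmetric_elements
-- ===== SOURCE A (Python) =====
-- def find_symmetric_elements(elements):
--     symmetric_elements = []
--     i = 0
--     for node1, element1 in elements.items():
--         i += 1
--         j = 0
--         for node2, element2 in elements.items():
--             j += 1
--             if j > i:
--                 if sorted(element1) == sorted(element2):
--                 # if element1.nodes == element2.nodes:
--                     symmetric_elements.append((node1, node2))
--     return symmetric_elements
-- ===== SOURCE B (Python) =====
-- def find_symmetric_elements(elements):
--     # Pre-sort every element once, then pair each head with its matching tail entries.
--     keyed = [(node, sorted(element)) for node, element in elements.items()]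
--     result = []
--     while keyed:
--         n1, k1 = keyed.pop(0)
--         result += [(n1, n2) for n2, k2 in keyed if k1 == k2]
--     return result
-- ===== Notes on version B (the rewrite author's own statement) =====
-- stated objective: faster
-- what changed: B sorts each element once in a preprocessing pass and then pairs each head with matching entries of the remaining suffix, instead of A's counter-guarded nested full scans that re-sort both elements inside the inner loop.
import Mathlib
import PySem

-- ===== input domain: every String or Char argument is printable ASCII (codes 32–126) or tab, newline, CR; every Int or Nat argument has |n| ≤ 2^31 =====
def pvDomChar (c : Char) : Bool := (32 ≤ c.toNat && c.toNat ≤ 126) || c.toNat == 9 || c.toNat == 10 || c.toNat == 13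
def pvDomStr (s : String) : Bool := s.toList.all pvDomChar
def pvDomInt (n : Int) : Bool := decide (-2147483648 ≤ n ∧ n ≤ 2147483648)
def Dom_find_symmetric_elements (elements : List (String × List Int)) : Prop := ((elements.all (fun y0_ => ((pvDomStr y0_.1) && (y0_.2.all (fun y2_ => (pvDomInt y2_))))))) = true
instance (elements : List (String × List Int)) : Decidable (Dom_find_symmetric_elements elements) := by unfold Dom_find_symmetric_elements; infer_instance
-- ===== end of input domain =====

-- B pre-sorts every element once and pairs each head with matching tail entries (objective: faster, constant-factor — O(n) sorts instead of O(n^2)).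

-- ===== PORT A =====
-- outer/inner counter loops ported as foldl over (accumulated pairs, counter)
def find_symmetric_elements (elements : List (String × List Int)) : List (String × String) :=
  let st := elements.foldl (fun (st : List (String × String) × Int) p1 =>
      let i := st.2 + 1
      let inner := elements.foldl (fun (st2 : List (String × String) × Int) p2 =>
          let j := st2.2 + 1
          let sym :=
            if j > i then
              if PySem.List.sorted p1.2 (fun x => x) false = PySem.List.sorted p2.2 (fun x => x) false then
                st2.1 ++ [(p1.1, p2.1)]
              else st2.1
            else st2.1
          (sym, j)) (st.1, (0 : Int))
      (inner.1, i)) ([], (0 : Int))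
  st.1

-- ===== PORT B =====
-- the `while keyed: keyed.pop(0); result += …` loop, as structural recursion with the result accumulator
def fse_altGo (keyed : List (String × List Int)) (result : List (String × String)) : List (String × String) :=
  match keyed with
  | [] => result
  | (n1, k1) :: rest =>
      fse_altGo rest (result ++ (rest.filter (fun q => decide (k1 = q.2))).map (fun q => (n1, q.1)))

def find_symmetric_elements_alt (elements : List (String × List Int)) : List (String × String) :=
  let keyed := elements.map (fun p => (p.1, PySem.List.sorted p.2 (fun x => x) false))
  fse_altGo keyed []

-- ===== PRECONDITION & SPEC =====
-- Pre_ excludes association lists with duplicate keys: a Python dict cannot contain them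
-- (dict construction collapses duplicates), so such lists do not represent any dict input of A.
def Pre_find_symmetric_elements (elements : List (String × List Int)) : Prop :=
  (elements.map Prod.fst).Nodup
instance (elements : List (String × List Int)) : Decidable (Pre_find_symmetric_elements elements) := by unfold Pre_find_symmetric_elements; infer_instance

def pvWitness_find_symmetric_elements : (List (String × List Int)) :=
  [("a", [2, 1]), ("b", [1, 2]), ("c", [3])]

def Spec_find_symmetric_elements (elements : List (String × List Int)) (out : List (String × String)) : Prop := out = find_symmetric_elements_alt elements
instance (elements : List (String × List Int)) (out : List (String × String)) : Decidable (Spec_find_symmetric_elements elements out) := by unfold Spec_find_symmetric_elements; infer_instance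

-- ===== CLAIM (what is proved, stated in full; the proofs are below) =====
def Claim_equal_find_symmetric_elements : Prop := ∀ (elements : List (String × List Int)), Dom_find_symmetric_elements elements → Pre_find_symmetric_elements elements → Spec_find_symmetric_elements elements (find_symmetric_elements elements)

-- ===== LEMMAS AND PROOFS =====

-- canonical (sorted) key of an element
def fse_key (e : List Int) : List Int := PySem.List.sorted e (fun x => x) false

-- pairs contributed by one element against a suffix
def fse_pairs (p : String × List Int) (l : List (String × List Int)) : List (String × String) :=
  (l.filter (fun q => decide (fse_key p.2 = fse_key q.2))).map (fun q => (p.1, q.1))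

-- reference shape both sides reduce to
def fse_ref : List (String × List Int) → List (String × String)
  | [] => []
  | p :: t => fse_pairs p t ++ fse_ref t

-- the inner loop's step function of port A
def fse_innerStep (i : Int) (p1 : String × List Int) :
    List (String × String) × Int → (String × List Int) → List (String × String) × Int :=
  fun st2 p2 =>
    let j := st2.2 + 1
    let sym :=
      if j > i then
        if PySem.List.sorted p1.2 (fun x => x) false = PySem.List.sorted p2.2 (fun x => x) false then
          st2.1 ++ [(p1.1, p2.1)]
        else st2.1
      else st2.1
    (sym, j)

theorem fse_inner_all (p1 : String × List Int) (i : Int) :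
    ∀ (l : List (String × List Int)) (acc : List (String × String)) (c : Int), i ≤ c →
      l.foldl (fse_innerStep i p1) (acc, c) = (acc ++ fse_pairs p1 l, c + l.length) := by
  intro l
  induction l with
  | nil => intro acc c h; simp [fse_pairs]
  | cons q t ih =>
    intro acc c h
    have hj : c + 1 > i := by omega
    by_cases he : fse_key p1.2 = fse_key q.2
    · simp only [List.foldl_cons, fse_innerStep, if_pos hj, fse_key] at *
      rw [if_pos he, ih (acc ++ [(p1.1, q.1)]) (c + 1) (by omega)]
      simp [fse_pairs, fse_key, he]
      omega
    · simp only [List.foldl_cons, fse_innerStep, if_pos hj, fse_key] at *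
      rw [if_neg he, ih acc (c + 1) (by omega)]
      simp [fse_pairs, fse_key, he]
      omega

theorem fse_inner_drop (p1 : String × List Int) (i : Int) :
    ∀ (l : List (String × List Int)) (acc : List (String × String)) (c : Int),
      l.foldl (fse_innerStep i p1) (acc, c) = (acc ++ fse_pairs p1 (l.drop (i - c).toNat), c + l.length) := by
  intro l
  induction l with
  | nil => intro acc c; simp [fse_pairs]
  | cons q t ih =>
    intro acc c
    by_cases hc : i ≤ c
    · have h0 : (i - c).toNat = 0 := by omega
      rw [h0, List.drop_zero]
      exact fse_inner_all p1 i (q :: t) acc c hc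
    · have hj : ¬ (c + 1 > i) := by omega
      have hd : (i - c).toNat = (i - (c + 1)).toNat + 1 := by omega
      simp only [List.foldl_cons, fse_innerStep, if_neg hj]
      rw [ih acc (c + 1), hd]
      simp
      omega

-- the outer loop's step function of port A
def fse_outerStep (elements : List (String × List Int)) :
    List (String × String) × Int → (String × List Int) → List (String × String) × Int :=
  fun st p1 =>
    let i := st.2 + 1
    let inner := elements.foldl (fse_innerStep i p1) (st.1, (0 : Int))
    (inner.1, i)

theorem fse_outer (elements : List (String × List Int)) :
    ∀ (l : List (String × List Int)) (n : Nat), elements.drop n = l →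
      ∀ (acc : List (String × String)),
        l.foldl (fse_outerStep elements) (acc, (n : Int)) =
          (acc ++ fse_ref l, ((n + l.length : Nat) : Int)) := by
  intro l
  induction l with
  | nil => intro n _ acc; simp [fse_ref]
  | cons p t ih =>
    intro n hdrop acc
    have ht : elements.drop (n + 1) = t := by rw [← List.tail_drop, hdrop]; rfl
    simp only [List.foldl_cons, fse_outerStep]
    rw [fse_inner_drop p ((n : Int) + 1) elements acc 0]
    have hdropn : (((n : Int) + 1) - 0).toNat = n + 1 := by omega
    rw [hdropn, ht]
    have hcast : (n : Int) + 1 = ((n + 1 : Nat) : Int) := by push_cast; ring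
    rw [hcast, ih (n + 1) ht (acc ++ fse_pairs p t)]
    simp only [fse_ref, List.append_assoc, Prod.mk.injEq, List.length_cons]
    exact ⟨trivial, by push_cast; ring⟩

theorem fse_A_eq_ref (elements : List (String × List Int)) :
    find_symmetric_elements elements = fse_ref elements := by
  have h := fse_outer elements elements 0 (by simp) []
  simp only [Nat.cast_zero] at h
  show (elements.foldl (fse_outerStep elements) ([], (0 : Int))).1 = fse_ref elements
  rw [h]
  simp

theorem fse_B_eq_ref :
    ∀ (l : List (String × List Int)) (res : List (String × String)),
      fse_altGo (l.map (fun p => (p.1, PySem.List.sorted p.2 (fun x => x) false))) res =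
        res ++ fse_ref l := by
  intro l
  induction l with
  | nil => intro res; simp [fse_altGo, fse_ref]
  | cons p t ih =>
    intro res
    simp only [List.map_cons, fse_altGo]
    rw [ih]
    simp only [fse_ref, fse_pairs, fse_key, List.filter_map, Function.comp_def, List.append_assoc, List.map_map]
    rfl

-- ===== VERDICT (by name: the statement is the Claim_ definition above) =====
theorem find_symmetric_elements_spec : Claim_equal_find_symmetric_elements := by
  intro elements _ _
  show find_symmetric_elements elements = find_symmetric_elements_alt elements
  rw [fse_A_eq_ref]
  show _ = fse_altGo _ []
  rw [fse_B_eq_ref]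
  simp
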